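-- pv_equiv track=rewrite | github.com/DIG-Network/proof_research | sub-problems/verifier-oracle-model/experiments/adaptive-coordinate-or-rsparse-xor-tree-depth-wt-two-n5/script.py | build_coord_partition_masks
-- ===== SOURCE A (Python) =====
-- N = 5
--
-- def build_coord_partition_masks(masks: list[int]) -> list[tuple[int, int]]:
--     out: list[tuple[int, int]] = []
--     for i in range(N):
--         b0 = 0
--         b1 = 0
--         for k, m in enumerate(masks):
--             if (m >> i) & 1:
--                 b1 |= 1 << k
--             else:
--                 b0 |= 1 << k
--         out.append((b0, b1))
--     return out
-- ===== SOURCE B (Python) =====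
-- N = 5
--
-- def build_coord_partition_masks(masks: list[int]) -> list[tuple[int, int]]:
--     # Horner-style: one reverse pass shifting each per-bit pair left and appending
--     # the new low bit, instead of OR-ing 1 << k position masks.
--     res = [(0, 0)] * N
--     for m in reversed(masks):
--         res = [((b0 << 1) | (1 - (m >> i & 1)), (b1 << 1) | (m >> i & 1))
--                for i, (b0, b1) in enumerate(res)]
--     return res
-- ===== Notes on version B (the rewrite author's own statement) =====
-- stated objective: alternative
-- what changed: A loops over the 5 bit positions and, per position, scans the masks accumulating both partition masks by OR-ing 1<<k position bits; B makes a single reverse pass over the masks, rebuilding all 5 (b0,b1) pairs Horner-style by shifting each mask left and OR-ing in the new low bit, with no 1<<k power ever formed.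
import Mathlib
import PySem

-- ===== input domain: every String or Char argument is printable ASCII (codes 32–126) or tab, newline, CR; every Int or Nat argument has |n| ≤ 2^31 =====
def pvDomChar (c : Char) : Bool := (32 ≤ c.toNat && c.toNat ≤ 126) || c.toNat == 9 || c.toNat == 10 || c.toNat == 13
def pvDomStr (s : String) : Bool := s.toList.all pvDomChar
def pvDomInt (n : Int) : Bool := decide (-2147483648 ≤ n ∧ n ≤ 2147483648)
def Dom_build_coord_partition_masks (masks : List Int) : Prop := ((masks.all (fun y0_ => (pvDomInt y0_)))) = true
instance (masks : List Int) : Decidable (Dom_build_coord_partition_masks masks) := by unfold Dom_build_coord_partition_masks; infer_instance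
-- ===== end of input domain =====

-- B replaces A's five OR-of-(1<<k) accumulation passes by a single reverse (Horner-style) pass
-- that shifts each per-bit pair left and ORs in the new low bit (alternative decomposition).


-- ===== PORT A =====
-- Python's '(m >> i) & 1' truthiness test, shared subexpression of both sources
def pvTest (m : Int) (i : Int) : Bool := PySem.Int.band (m >>> i.toNat) 1 != 0

-- A's inner loop for bit i: accumulate b0 and b1 over enumerate(masks)
def pvInnerA (masks : List Int) (i : Int) : Int × Int :=
  (PySem.List.enumerate masks 0).foldl
    (fun (p : Int × Int) (km : Int × Int) =>
      if pvTest km.2 i then (p.1, PySem.Int.bor p.2 ((1:Int) <<< km.1.toNat))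
      else (PySem.Int.bor p.1 ((1:Int) <<< km.1.toNat), p.2)) (0, 0)

def build_coord_partition_masks (masks : List Int) : List (Int × Int) :=
  (PySem.List.pyRange 0 5 1).foldl (fun out i => out ++ [pvInnerA masks i]) []

-- ===== PORT B =====
-- Python's 'x << 1'
def pvShl1 (x : Int) : Int := x <<< (1:Nat)

-- one step of B's reverse pass: the list comprehension over enumerate(res)
def pvStepB (m : Int) (res : List (Int × Int)) : List (Int × Int) :=
  (PySem.List.enumerate res 0).map
    (fun p =>
      (PySem.Int.bor (pvShl1 p.2.1) (1 - PySem.Int.band (m >>> p.1.toNat) 1),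
       PySem.Int.bor (pvShl1 p.2.2) (PySem.Int.band (m >>> p.1.toNat) 1)))

def build_coord_partition_masks_alt (masks : List Int) : List (Int × Int) :=
  masks.reverse.foldl (fun res m => pvStepB m res) (List.replicate 5 ((0:Int), (0:Int)))

-- ===== PRECONDITION & SPEC =====
def Spec_build_coord_partition_masks (masks : List Int) (out : List (Int × Int)) : Prop := out = build_coord_partition_masks_alt masks
instance (masks : List Int) (out : List (Int × Int)) : Decidable (Spec_build_coord_partition_masks masks out) := by unfold Spec_build_coord_partition_masks; infer_instance

-- ===== CLAIM (what is proved, stated in full; the proofs are below) =====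
def Claim_equal_build_coord_partition_masks : Prop := ∀ (masks : List Int), Dom_build_coord_partition_masks masks → Spec_build_coord_partition_masks masks (build_coord_partition_masks masks)

-- ===== LEMMAS AND PROOFS =====

-- the sum of 2^(s+k) over the positions k whose mask has (resp. lacks) bit i
def pvSum1 (i : Int) (ms : List Int) (s : Nat) : Nat :=
  match ms with
  | [] => 0
  | m :: t => (if pvTest m i then 2^s else 0) + pvSum1 i t (s+1)

def pvSum0 (i : Int) (ms : List Int) (s : Nat) : Nat :=
  match ms with
  | [] => 0
  | m :: t => (if pvTest m i then 0 else 2^s) + pvSum0 i t (s+1)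

theorem pvBitDecomp (b : Nat) : Nat.bit (b % 2 == 1) (b / 2) = b := by
  simp [Nat.bit]; rcases Nat.mod_two_eq_zero_or_one b with h | h <;> simp [h] <;> omega

theorem pvOrPow (s : Nat) : ∀ b, b < 2^s → b ||| 2^s = b + 2^s := by
  induction s with
  | zero => intro b hb; interval_cases b; decide
  | succ s ih =>
    intro b hb
    have h1 : (2^(s+1)) = Nat.bit false (2^s) := by simp [Nat.bit]; ring
    have hq : b / 2 < 2^s := by rw [pow_succ] at hb; omega
    rw [← pvBitDecomp b, h1, Nat.lor_bit, ih _ hq]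
    simp [Nat.bit]; rcases Nat.mod_two_eq_zero_or_one b with h | h <;> simp [h] <;> ring_nf

theorem pvShiftOne (s : Nat) : (1:Int) <<< s = ((2^s : Nat) : Int) := by
  rw [Int.shiftLeft_eq]; push_cast; ring

-- A's inner fold computes the two disjoint bit sums
theorem pvA_fold (i : Int) : ∀ (ms : List Int) (s b0 b1 : Nat), b0 < 2^s → b1 < 2^s →
    (PySem.List.enumerate ms (s:Int)).foldl
      (fun (p : Int × Int) (km : Int × Int) =>
        if pvTest km.2 i then (p.1, PySem.Int.bor p.2 ((1:Int) <<< km.1.toNat))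
        else (PySem.Int.bor p.1 ((1:Int) <<< km.1.toNat), p.2)) ((b0:Int), (b1:Int))
    = (((b0 + pvSum0 i ms s : Nat) : Int), ((b1 + pvSum1 i ms s : Nat) : Int)) := by
  intro ms
  induction ms with
  | nil => intro s b0 b1 _ _; simp [pvSum0, pvSum1]
  | cons m t ih =>
    intro s b0 b1 h0 h1
    rw [PySem.List.enumerate_cons]
    have hs1 : (s:Int) + 1 = ((s+1 : Nat) : Int) := by push_cast; ring
    have hpow : (2:Nat)^(s+1) = 2^s + 2^s := by rw [pow_succ]; ring
    simp only [List.foldl_cons, hs1]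
    by_cases hc : pvTest m i
    · simp only [hc, if_true, Int.toNat_natCast, pvShiftOne s,
        PySem.Int.bor_natCast, pvOrPow s b1 h1]
      rw [ih (s+1) b0 (b1 + 2^s) (by omega) (by omega)]
      simp only [pvSum0, pvSum1, hc, if_true, Prod.mk.injEq, Nat.cast_inj]
      omega
    · simp only [hc, Bool.false_eq_true, if_false, Int.toNat_natCast, pvShiftOne s,
        PySem.Int.bor_natCast, pvOrPow s b0 h0]
      rw [ih (s+1) (b0 + 2^s) b1 (by omega) (by omega)]
      simp only [pvSum0, pvSum1, hc, Bool.false_eq_true, if_false, Prod.mk.injEq, Nat.cast_inj]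
      omega

theorem pvInnerA_eq (masks : List Int) (i : Int) :
    pvInnerA masks i = (((pvSum0 i masks 0 : Nat) : Int), ((pvSum1 i masks 0 : Nat) : Int)) := by
  have h := pvA_fold i masks 0 0 0 (by norm_num) (by norm_num)
  simpa [pvInnerA] using h

-- Horner (front-weighted) versions of the two bit sums
def pvH1 (i : Int) : List Int → Nat
  | [] => 0
  | m :: t => (if pvTest m i then 1 else 0) + 2 * pvH1 i t

def pvH0 (i : Int) : List Int → Nat
  | [] => 0
  | m :: t => (if pvTest m i then 0 else 1) + 2 * pvH0 i t

theorem pvSum1_horner (i : Int) : ∀ (ms : List Int) (s : Nat), pvSum1 i ms s = 2^s * pvH1 i ms := by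
  intro ms
  induction ms with
  | nil => intro s; simp [pvSum1, pvH1]
  | cons m t ih =>
    intro s
    simp only [pvSum1, pvH1, ih (s+1), pow_succ]
    split <;> ring

theorem pvSum0_horner (i : Int) : ∀ (ms : List Int) (s : Nat), pvSum0 i ms s = 2^s * pvH0 i ms := by
  intro ms
  induction ms with
  | nil => intro s; simp [pvSum0, pvH0]
  | cons m t ih =>
    intro s
    simp only [pvSum0, pvH0, ih (s+1), pow_succ]
    split <;> ring

-- Nat-level model of B's state list
def pvUpdN (m : Int) : List (Nat × Nat) → Nat → List (Nat × Nat)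
  | [], _ => []
  | p :: r, t =>
    (if pvTest m (t:Int) then (2*p.1, 2*p.2+1) else (2*p.1+1, 2*p.2)) :: pvUpdN m r (t+1)

def pvModel : List Int → List (Nat × Nat)
  | [] => List.replicate 5 (0, 0)
  | m :: t => pvUpdN m (pvModel t) 0

def pvCastP (l : List (Nat × Nat)) : List (Int × Int) := l.map (fun p => ((p.1 : Int), (p.2 : Int)))

theorem pvTwoMulOrOne (u : Nat) : 2*u ||| 1 = 2*u + 1 := by
  have h2 : 2*u = Nat.bit false u := by simp [Nat.bit]
  have h1 : (1:Nat) = Nat.bit true 0 := by simp [Nat.bit]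
  rw [h2, h1, Nat.lor_bit]
  simp [Nat.bit]

theorem pvBitCases (m : Int) (t : Nat) :
    PySem.Int.band (m >>> t) 1 = (if pvTest m (t:Int) then (1:Int) else 0) := by
  have h := PySem.Int.band_one (m >>> t)
  have he : PySem.Int.mod (m >>> t) 2 = (m >>> t) % 2 :=
    PySem.Int.mod_eq_emod_of_pos (by norm_num)
  unfold pvTest
  rw [Int.toNat_natCast]
  rw [h, he]
  have hb : (m >>> t) % 2 = 0 ∨ (m >>> t) % 2 = 1 := by omega
  rcases hb with hm | hm <;> simp [hm]

theorem pvShl1_cast (u : Nat) : pvShl1 ((u:Nat):Int) = ((2*u : Nat) : Int) := by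
  unfold pvShl1; rw [Int.shiftLeft_eq]; push_cast; ring

theorem pvHead (m : Int) (t : Nat) (u v : Nat) :
    ((PySem.Int.bor (pvShl1 ((u:Nat):Int)) (1 - PySem.Int.band (m >>> t) 1),
      PySem.Int.bor (pvShl1 ((v:Nat):Int)) (PySem.Int.band (m >>> t) 1)) : Int × Int)
    = if pvTest m (t:Int) then (((2*u : Nat):Int), ((2*v+1 : Nat):Int))
      else (((2*u+1 : Nat):Int), ((2*v : Nat):Int)) := by
  rw [pvBitCases, pvShl1_cast u, pvShl1_cast v]
  have hone : (1:Int) = ((1:Nat):Int) := by norm_num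
  by_cases hc : pvTest m (t:Int)
  · simp only [hc, if_true, Prod.mk.injEq]
    refine ⟨by simp, ?_⟩
    rw [hone, PySem.Int.bor_natCast, pvTwoMulOrOne]
  · simp only [hc, Bool.false_eq_true, if_false, Prod.mk.injEq]
    refine ⟨?_, by simp⟩
    rw [show ((1:Int) - 0) = ((1:Nat):Int) by norm_num, PySem.Int.bor_natCast, pvTwoMulOrOne]

theorem pvStepB_model (m : Int) : ∀ (l : List (Nat × Nat)) (t : Nat),
    (PySem.List.enumerate (pvCastP l) (t:Int)).map
      (fun p =>
        (PySem.Int.bor (pvShl1 p.2.1) (1 - PySem.Int.band (m >>> p.1.toNat) 1),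
         PySem.Int.bor (pvShl1 p.2.2) (PySem.Int.band (m >>> p.1.toNat) 1)))
    = pvCastP (pvUpdN m l t) := by
  intro l
  induction l with
  | nil => intro t; simp [pvCastP, pvUpdN]
  | cons p r ih =>
    intro t
    have ht1 : (t:Int) + 1 = ((t+1 : Nat) : Int) := by push_cast; ring
    rw [show pvCastP (p :: r) = ((p.1:Int), (p.2:Int)) :: pvCastP r from rfl,
      PySem.List.enumerate_cons, List.map_cons, ht1, ih (t+1)]
    simp only [pvUpdN, pvCastP, List.map_cons, Int.toNat_natCast,
      Int.shiftRight_natCast_right, Nat.cast_one]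
    congr 1
    rw [pvHead]
    by_cases hc : pvTest m (t:Int) <;> simp [hc]

theorem pvFoldr_model : ∀ (ms : List Int),
    ms.foldr (fun m res => pvStepB m res) (List.replicate 5 ((0:Int), (0:Int)))
    = pvCastP (pvModel ms) := by
  intro ms
  induction ms with
  | nil => decide
  | cons m t ih =>
    rw [List.foldr_cons, ih]
    show pvStepB m (pvCastP (pvModel t)) = pvCastP (pvModel (m :: t))
    unfold pvStepB
    have h := pvStepB_model m (pvModel t) 0
    rw [show (((0:Nat)):Int) = (0:Int) from rfl] at h
    rw [h]
    rfl

theorem pvAlt_model (masks : List Int) :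
    masks.reverse.foldl (fun res m => pvStepB m res) (List.replicate 5 ((0:Int), (0:Int)))
    = pvCastP (pvModel masks) := by
  rw [List.foldl_reverse]
  exact pvFoldr_model masks

theorem pvModel_eq : ∀ (ms : List Int),
    pvModel ms = [(pvH0 0 ms, pvH1 0 ms), (pvH0 1 ms, pvH1 1 ms), (pvH0 2 ms, pvH1 2 ms),
      (pvH0 3 ms, pvH1 3 ms), (pvH0 4 ms, pvH1 4 ms)] := by
  intro ms
  induction ms with
  | nil => simp [pvModel, pvH0, pvH1, List.replicate]
  | cons m t ih =>
    show pvUpdN m (pvModel t) 0 = _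
    rw [ih]
    simp only [pvUpdN, pvH0, pvH1]
    norm_num
    refine ⟨?_, ?_, ?_, ?_, ?_⟩ <;> split <;> simp <;> omega

-- ===== VERDICT (by name: the statement is the Claim_ definition above) =====
theorem build_coord_partition_masks_spec : Claim_equal_build_coord_partition_masks := by
  unfold Claim_equal_build_coord_partition_masks
  intro masks _
  unfold Spec_build_coord_partition_masks
  unfold build_coord_partition_masks build_coord_partition_masks_alt
  rw [pvAlt_model, pvModel_eq]
  have hr : PySem.List.pyRange 0 5 1 = [0,1,2,3,4] := by decide
  rw [hr]
  simp only [List.foldl_cons, List.foldl_nil, List.nil_append, List.append_assoc,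
    List.singleton_append, pvInnerA_eq, pvSum0_horner, pvSum1_horner, pow_zero, one_mul]
  rfl
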